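-- pv_equiv track=rewrite | github.com/hdkassamali/Python-Data-Structures-Exercise-Unit-21.2 | fs_3_three_odd_numbers/three_odd_numbers.py | three_odd_numbers
-- ===== SOURCE A (Python) =====
-- def three_odd_numbers(nums):
--     """Is the sum of any 3 sequential numbers odd?"
--
--         >>> three_odd_numbers([1, 2, 3, 4, 5])
--         True
--
--         >>> three_odd_numbers([0, -2, 4, 1, 9, 12, 4, 1, 0])
--         True
--
--         >>> three_odd_numbers([5, 2, 1])
--         False
--
--         >>> three_odd_numbers([1, 2, 3, 3, 2])
--         False
--     """
--
--     sum_of_nums = 0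
--
--     for idx in range(0, len(nums) - 2):
--         sum_of_nums = (nums[idx] + nums[idx + 1] + nums[idx + 2])
--         if sum_of_nums % 2 == 1:
--             return True
--         else:
--             sum_of_nums = 0
--     return False
-- ===== SOURCE B (Python) =====
-- def three_odd_numbers(nums):
--     """Is the sum of any 3 sequential numbers odd? (prefix-sum table version)"""
--     prefix = [0]
--     for x in nums:
--         prefix.append(prefix[-1] + x)
--     return any((prefix[i + 3] - prefix[i]) % 2 == 1 for i in range(len(nums) - 2))
-- ===== Notes on version B (the rewrite author's own statement) =====
-- stated objective: alternative
-- what changed: B builds a prefix-sum table once and tests each window's parity as a difference of two prefix entries, instead of A's loop that re-adds the three neighbours of every window.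
import Mathlib
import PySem

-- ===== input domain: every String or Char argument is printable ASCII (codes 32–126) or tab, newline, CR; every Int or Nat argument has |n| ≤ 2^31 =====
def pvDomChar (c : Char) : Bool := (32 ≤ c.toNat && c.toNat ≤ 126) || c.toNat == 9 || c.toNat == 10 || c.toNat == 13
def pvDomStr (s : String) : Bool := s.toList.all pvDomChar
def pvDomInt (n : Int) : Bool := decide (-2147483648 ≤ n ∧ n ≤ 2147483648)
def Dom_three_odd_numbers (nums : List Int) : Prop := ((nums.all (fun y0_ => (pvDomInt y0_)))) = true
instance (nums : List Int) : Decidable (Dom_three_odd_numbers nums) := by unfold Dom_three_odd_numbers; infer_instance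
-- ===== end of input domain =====

-- B replaces A's re-summing of each 3-window by a prefix-sum table and tests each
-- window's parity as a difference of two prefix entries (objective: alternative).

-- ===== PORT A =====
-- the for-loop with early return, over range(0, len(nums)-2)
def threeOddLoopA (nums : List Int) : List Int → Bool
  | [] => false
  | idx :: rest =>
    if PySem.Int.mod (PySem.List.pyGetD nums idx 0 + PySem.List.pyGetD nums (idx + 1) 0
        + PySem.List.pyGetD nums (idx + 2) 0) 2 == 1 then true
    else threeOddLoopA nums rest

def three_odd_numbers (nums : List Int) : Bool :=
  threeOddLoopA nums (PySem.List.pyRange 0 ((nums.length : Int) - 2))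

-- ===== PORT B =====
-- prefix = [0]; for x in nums: prefix.append(prefix[-1] + x)
def threeOddPrefixB (nums : List Int) : List Int :=
  nums.foldl (fun p x => p ++ [PySem.List.pyGetD p (-1) 0 + x]) [0]

def three_odd_numbers_alt (nums : List Int) : Bool :=
  let pre := threeOddPrefixB nums
  (PySem.List.pyRange 0 ((nums.length : Int) - 2)).any (fun i =>
    PySem.Int.mod (PySem.List.pyGetD pre (i + 3) 0 - PySem.List.pyGetD pre i 0) 2 == 1)

-- ===== PRECONDITION & SPEC =====
def Spec_three_odd_numbers (nums : List Int) (out : Bool) : Prop := out = three_odd_numbers_alt nums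
instance (nums : List Int) (out : Bool) : Decidable (Spec_three_odd_numbers nums out) := by unfold Spec_three_odd_numbers; infer_instance

-- ===== CLAIM (what is proved, stated in full; the proofs are below) =====
def Claim_equal_three_odd_numbers : Prop := ∀ (nums : List Int), Dom_three_odd_numbers nums → Spec_three_odd_numbers nums (three_odd_numbers nums)

-- ===== LEMMAS AND PROOFS =====

-- A's early-return loop is `any` over the index list
theorem threeOddLoopA_eq_any (nums : List Int) (l : List Int) :
    threeOddLoopA nums l = l.any (fun idx =>
      PySem.Int.mod (PySem.List.pyGetD nums idx 0 + PySem.List.pyGetD nums (idx + 1) 0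
        + PySem.List.pyGetD nums (idx + 2) 0) 2 == 1) := by
  induction l with
  | nil => rfl
  | cons idx rest ih =>
    rw [List.any_cons, ← ih, threeOddLoopA]
    cases hc : (PySem.Int.mod (PySem.List.pyGetD nums idx 0 + PySem.List.pyGetD nums (idx + 1) 0
        + PySem.List.pyGetD nums (idx + 2) 0) 2 == 1)
    · rw [if_neg Bool.false_ne_true, Bool.false_or]
    · rw [if_pos rfl, Bool.true_or]

-- `any` respects predicates equal on the members
theorem any_congr_mem {α : Type} {l : List α} {p q : α → Bool}
    (h : ∀ x ∈ l, p x = q x) : l.any p = l.any q := by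
  induction l with
  | nil => rfl
  | cons x xs ih =>
    simp only [List.any_cons, h x (by simp), ih (fun y hy => h y (by simp [hy]))]

-- B's append loop builds the scanl of partial sums
theorem threeOddPrefixB_loop (l : List Int) (acc : List Int) (s : Int) :
    l.foldl (fun p x => p ++ [PySem.List.pyGetD p (-1) 0 + x]) (acc ++ [s])
      = acc ++ List.scanl (· + ·) s l := by
  induction l generalizing acc s with
  | nil => simp
  | cons x xs ih =>
    have hlast : PySem.List.pyGetD (acc ++ [s]) (-1) 0 = s := by
      simp [PySem.List.pyGetD, PySem.List.pyGet?, PySem.List.pyIdx?]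
    simp only [List.foldl_cons, hlast]
    rw [ih (acc ++ [s]) (s + x), List.scanl_cons]
    simp

theorem threeOddPrefixB_eq_scanl (nums : List Int) :
    threeOddPrefixB nums = List.scanl (· + ·) 0 nums := by
  have := threeOddPrefixB_loop nums [] 0
  simpa [threeOddPrefixB] using this

-- entries of the scanl are prefix sums
theorem scanl_getElem? (l : List Int) (s : Int) (k : Nat) (h : k ≤ l.length) :
    (List.scanl (· + ·) s l)[k]? = some (s + (l.take k).sum) := by
  induction l generalizing s k with
  | nil => simp at h; subst h; simp
  | cons x xs ih =>
    cases k with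
    | zero => simp
    | succ k =>
      simp only [List.scanl_cons, List.getElem?_cons_succ, List.take_succ_cons, List.sum_cons]
      rw [ih _ _ (by simpa using h)]; ring_nf

-- one step of the prefix-sum window
theorem take_sum_succ (l : List Int) (k : Nat) (h : k < l.length) :
    (l.take (k + 1)).sum = (l.take k).sum + l.getD k 0 := by
  rw [List.take_add_one]
  simp only [List.getElem?_eq_getElem h, Option.toList_some, List.sum_append, List.sum_cons,
    List.sum_nil, add_zero]
  rw [List.getD_eq_getElem _ _ h]

-- a window sum is a difference of two prefix entries
theorem prefix_window (nums : List Int) (k : Nat) (h : k + 2 < nums.length) :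
    PySem.List.pyGetD (threeOddPrefixB nums) ((k : Int) + 3) 0
      - PySem.List.pyGetD (threeOddPrefixB nums) (k : Int) 0
    = nums.getD k 0 + nums.getD (k + 1) 0 + nums.getD (k + 2) 0 := by
  rw [threeOddPrefixB_eq_scanl]
  have h3 : ((k : Int) + 3) = ((k + 3 : Nat) : Int) := by push_cast; ring
  rw [h3, PySem.List.pyGetD_natCast, PySem.List.pyGetD_natCast]
  have hlen : (List.scanl (· + ·) 0 nums).length = nums.length + 1 := by
    simp [List.length_scanl]
  have e1 : (List.scanl (· + ·) 0 nums).getD (k + 3) 0 = 0 + (nums.take (k + 3)).sum := by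
    rw [List.getD_eq_getElem?_getD, scanl_getElem? _ _ _ (by omega)]; rfl
  have e2 : (List.scanl (· + ·) 0 nums).getD k 0 = 0 + (nums.take k).sum := by
    rw [List.getD_eq_getElem?_getD, scanl_getElem? _ _ _ (by omega)]; rfl
  rw [e1, e2,
    show k + 3 = (k + 2) + 1 from rfl, take_sum_succ _ _ (by omega),
    show k + 2 = (k + 1) + 1 from rfl, take_sum_succ _ _ (by omega),
    take_sum_succ _ _ (by omega)]
  ring

-- ===== VERDICT (by name: the statement is the Claim_ definition above) =====
theorem three_odd_numbers_spec : Claim_equal_three_odd_numbers := by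
  intro nums _
  unfold Spec_three_odd_numbers three_odd_numbers three_odd_numbers_alt
  rw [threeOddLoopA_eq_any]
  refine any_congr_mem ?_
  intro i hi
  rcases PySem.List.mem_pyRange_one.mp hi with ⟨h0, hlt⟩
  obtain ⟨k, rfl⟩ := Int.eq_ofNat_of_zero_le h0
  have hk : k + 2 < nums.length := by omega
  rw [prefix_window nums k hk]
  have c1 : (k : Int) + 1 = ((k + 1 : Nat) : Int) := by push_cast; ring
  have c2 : (k : Int) + 2 = ((k + 2 : Nat) : Int) := by push_cast; ring
  rw [c1, c2, PySem.List.pyGetD_natCast, PySem.List.pyGetD_natCast, PySem.List.pyGetD_natCast]
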